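-- pv_equiv track=rewrite | github.com/Midan14/EVOLUTION-SCRAPER | road_analyzer.py | _build_derived_road
-- ===== SOURCE A (Python) =====
-- def _build_derived_road(big_road, delta):
--     """Construir Derived Road (Big Eye=1, Small=2, Cockroach=3)"""
--     if not big_road or len(big_road) <= delta:
--         return []
--
--     derived = []
--     current_col = []
--     last_color = None  # 'red' or 'blue'
--
--     nodes_to_process = []
--     for k, col in enumerate(big_road):
--         for m, _ in enumerate(col):
--             is_start_of_col = m == 0
--
--             if is_start_of_col:
--                 if k < delta + 1:
--                     continue
--             else:
--                 if k < delta: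
--                     continue
--
--             nodes_to_process.append((k, m, is_start_of_col))
--
--     for k, m, is_start in nodes_to_process:
--         color = None
--         if is_start:
--             col_1 = big_road[k - 1]
--             col_2 = big_road[k - 1 - delta]
--             color = "red" if len(col_1) == len(col_2) else "blue"
--         else:
--             target_col = big_road[k - delta]
--             if m < len(target_col):
--                 color = "red"
--             else:
--                 color = "blue"
--
--         if last_color is None:
--             current_col.append(color)
--             last_color = color
--         elif color == last_color:
--             current_col.append(color)
--         else:
--             derived.append(current_col)
--             current_col = [color]
--             last_color = color
--
--     if current_col:
--         derived.append(current_col)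
--
--     return derived
-- ===== SOURCE B (Python) =====
-- def _add_run(runs, color, cnt):
--     """Append cnt cells of color to the run-length encoding, merging with the last run."""
--     if cnt <= 0:
--         return runs
--     if runs and runs[-1][0] == color:
--         return runs[:-1] + [(color, runs[-1][1] + cnt)]
--     return runs + [(color, cnt)]
--
--
-- def _build_derived_road(big_road, delta):
--     """Run-length version: per column, emit the start color plus arithmetically
--     counted red/blue runs (no per-cell scan), merging runs on the fly."""
--     if not big_road or len(big_road) <= delta:
--         return []
--
--     runs = []  # run-length encoded derived road: list of (color, count)
--     for k, col in enumerate(big_road):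
--         L = len(col)
--         if L == 0:
--             continue
--         if k >= delta + 1:
--             same = len(big_road[k - 1]) == len(big_road[k - 1 - delta])
--             runs = _add_run(runs, "red" if same else "blue", 1)
--         if L >= 2 and k >= delta:
--             reds = max(0, min(L - 1, len(big_road[k - delta]) - 1))
--             runs = _add_run(runs, "red", reds)
--             runs = _add_run(runs, "blue", (L - 1) - reds)
--     return [[color] * cnt for color, cnt in runs]
-- ===== Notes on version B (the rewrite author's own statement) =====
-- stated objective: alternative
-- what changed: A computes a color for every individual cell and groups consecutive equal colors with last_color/current_col state; B never scans cells: per column it computes the red/blue counts arithmetically (reds = clamp(len(target)-1, 0, L-1)) and merges (color,count) runs into a run-length encoding, expanding it to lists at the end.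
import Mathlib
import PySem

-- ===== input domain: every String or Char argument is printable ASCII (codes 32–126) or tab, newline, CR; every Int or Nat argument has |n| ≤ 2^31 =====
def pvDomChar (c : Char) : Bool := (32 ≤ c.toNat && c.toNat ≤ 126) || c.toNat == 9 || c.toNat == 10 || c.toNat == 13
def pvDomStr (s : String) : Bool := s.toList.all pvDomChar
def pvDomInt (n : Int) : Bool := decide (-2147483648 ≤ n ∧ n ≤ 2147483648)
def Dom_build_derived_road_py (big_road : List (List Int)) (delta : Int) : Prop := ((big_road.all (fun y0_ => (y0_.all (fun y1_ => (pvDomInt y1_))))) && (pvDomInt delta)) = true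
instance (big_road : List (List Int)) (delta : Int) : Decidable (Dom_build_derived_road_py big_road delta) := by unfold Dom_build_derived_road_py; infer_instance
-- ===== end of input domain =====

-- B replaces A's per-cell color computation + grouping state by a per-column run-length
-- encoding whose red/blue counts are computed arithmetically (no per-cell scan); objective: alternative.
-- A raises IndexError on some inputs with delta < 0 (B raises identically there); those are outside Pre_.

-- ===== PORT A =====
-- Literal port of A. Python list indexing big_road[i] is PySem.List.pyGet? (negative wrap); where it
-- would raise IndexError the port takes .getD [] — Pre_ excludes exactly those inputs.
def build_derived_road_py (big_road : List (List Int)) (delta : Int) : List (List String) :=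
  if big_road = [] ∨ (big_road.length : Int) ≤ delta then []
  else
    let nodes : List (Int × Int × Bool) :=
      (PySem.List.enumerate big_road 0).foldl (fun acc kc =>
        (PySem.List.enumerate kc.2 0).foldl (fun acc2 mc =>
          let is_start_of_col := mc.1 == 0
          if is_start_of_col then
            (if kc.1 < delta + 1 then acc2 else acc2 ++ [(kc.1, mc.1, is_start_of_col)])
          else
            (if kc.1 < delta then acc2 else acc2 ++ [(kc.1, mc.1, is_start_of_col)])) acc) []
    let st : List (List String) × List String × Option String :=
      nodes.foldl (fun st node =>
        let color : String :=
          if node.2.2 then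
            let col_1 := (PySem.List.pyGet? big_road (node.1 - 1)).getD []
            let col_2 := (PySem.List.pyGet? big_road (node.1 - 1 - delta)).getD []
            if col_1.length = col_2.length then "red" else "blue"
          else
            let target_col := (PySem.List.pyGet? big_road (node.1 - delta)).getD []
            if node.2.1 < (target_col.length : Int) then "red" else "blue"
        match st.2.2 with
        | none => (st.1, st.2.1 ++ [color], some color)
        | some lc =>
          if color = lc then (st.1, st.2.1 ++ [color], some lc)
          else (st.1 ++ [st.2.1], [color], some color)) ([], [], none)
    if st.2.1 = [] then st.1 else st.1 ++ [st.2.1]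

-- ===== PORT B =====
-- port of Source B's _add_run: append cnt cells of color to a run-length encoding, merging with the last run
def addRun (runs : List (String × Int)) (color : String) (cnt : Int) : List (String × Int) :=
  if cnt ≤ 0 then runs
  else
    match runs.getLast? with
    | some (lc, lcnt) =>
      if lc = color then runs.dropLast ++ [(color, lcnt + cnt)] else runs ++ [(color, cnt)]
    | none => [(color, cnt)]

def build_derived_road_py_alt (big_road : List (List Int)) (delta : Int) : List (List String) :=
  if big_road = [] ∨ (big_road.length : Int) ≤ delta then []
  else
    let runs : List (String × Int) :=
      (PySem.List.enumerate big_road 0).foldl (fun runs kc =>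
        let L : Int := (kc.2.length : Int)
        if L = 0 then runs
        else
          let runs1 :=
            if delta + 1 ≤ kc.1 then
              addRun runs
                (if ((PySem.List.pyGet? big_road (kc.1 - 1)).getD []).length
                    = ((PySem.List.pyGet? big_road (kc.1 - 1 - delta)).getD []).length
                 then "red" else "blue") 1
            else runs
          if 2 ≤ L ∧ delta ≤ kc.1 then
            let reds : Int :=
              max 0 (min (L - 1) ((((PySem.List.pyGet? big_road (kc.1 - delta)).getD []).length : Int) - 1))
            addRun (addRun runs1 "red" reds) "blue" (L - 1 - reds)
          else runs1) []
    runs.map (fun rc => List.replicate rc.2.toNat rc.1)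

-- ===== PRECONDITION & SPEC =====
-- Pre_ excludes exactly the inputs on which the Python A raises IndexError (possible only when
-- delta < 0: an eligible cell's lookup index k-1-delta or k-delta falls past the end of big_road).
-- B raises the same IndexError there, so these inputs are excluded rather than documented as a fix.
def Pre_build_derived_road_py (big_road : List (List Int)) (delta : Int) : Prop :=
  ∀ k : Nat, (h : k < big_road.length) →
    (big_road[k] ≠ [] → delta + 1 ≤ (k : Int) → (k : Int) - 1 - delta < (big_road.length : Int)) ∧
    (2 ≤ big_road[k].length → delta ≤ (k : Int) → (k : Int) - delta < (big_road.length : Int))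
instance (big_road : List (List Int)) (delta : Int) : Decidable (Pre_build_derived_road_py big_road delta) := by unfold Pre_build_derived_road_py; infer_instance
def pvWitness_build_derived_road_py : List (List Int) × Int := ([[1], [1], [1, 2]], 1)

def Spec_build_derived_road_py (big_road : List (List Int)) (delta : Int) (out : List (List String)) : Prop := out = build_derived_road_py_alt big_road delta
instance (big_road : List (List Int)) (delta : Int) (out : List (List String)) : Decidable (Spec_build_derived_road_py big_road delta out) := by unfold Spec_build_derived_road_py; infer_instance

-- ===== CLAIM (what is proved, stated in full; the proofs are below) =====
def Claim_equal_build_derived_road_py : Prop := ∀ (big_road : List (List Int)) (delta : Int), Dom_build_derived_road_py big_road delta → Pre_build_derived_road_py big_road delta → Spec_build_derived_road_py big_road delta (build_derived_road_py big_road delta)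

-- ===== LEMMAS AND PROOFS =====

-- ---------- A-side characterisation: A = pyGroupRuns of the flat color list ----------

-- the color A computes for a node (k, m, is_start) — same expression as A's inline code
def colorOf (br : List (List Int)) (delta : Int) (node : Int × Int × Bool) : String :=
  if node.2.2 then
    let col_1 := (PySem.List.pyGet? br (node.1 - 1)).getD []
    let col_2 := (PySem.List.pyGet? br (node.1 - 1 - delta)).getD []
    if col_1.length = col_2.length then "red" else "blue"
  else
    let target_col := (PySem.List.pyGet? br (node.1 - delta)).getD []
    if node.2.1 < (target_col.length : Int) then "red" else "blue"

def nodeOf (k : Int) (mc : Int × Int) : Int × Int × Bool := (k, mc.1, mc.1 == 0)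

def elig (delta k : Int) (mc : Int × Int) : Bool :=
  if mc.1 == 0 then !decide (k < delta + 1) else !decide (k < delta)

theorem innerA_eq (delta : Int) (k : Int) (l : List (Int × Int)) (acc : List (Int × Int × Bool)) :
    l.foldl (fun acc2 mc =>
      let is_start_of_col := mc.1 == 0
      if is_start_of_col then
        (if k < delta + 1 then acc2 else acc2 ++ [(k, mc.1, is_start_of_col)])
      else
        (if k < delta then acc2 else acc2 ++ [(k, mc.1, is_start_of_col)])) acc
    = acc ++ (l.filter (elig delta k)).map (nodeOf k) := by
  have hfun : (fun (acc2 : List (Int × Int × Bool)) (mc : Int × Int) =>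
      let is_start_of_col := mc.1 == 0
      if is_start_of_col then
        (if k < delta + 1 then acc2 else acc2 ++ [(k, mc.1, is_start_of_col)])
      else
        (if k < delta then acc2 else acc2 ++ [(k, mc.1, is_start_of_col)]))
      = fun acc2 mc => if elig delta k mc then acc2 ++ [nodeOf k mc] else acc2 := by
    funext acc2 mc
    by_cases h0 : mc.1 == 0 <;> by_cases h1 : k < delta + 1 <;> by_cases h2 : k < delta <;>
      simp [elig, nodeOf, h0, h1, h2]
  rw [hfun, PySem.List.foldl_append_if]

-- the node list A builds, as a flatMap over the enumerated columns
def nodesOf (delta : Int) (L : List (Int × List Int)) : List (Int × Int × Bool) :=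
  L.flatMap (fun kc => ((PySem.List.enumerate kc.2 0).filter (elig delta kc.1)).map (nodeOf kc.1))

theorem outerA_eq (delta : Int) :
    ∀ (L : List (Int × List Int)) (acc : List (Int × Int × Bool)),
    L.foldl (fun acc kc =>
      (PySem.List.enumerate kc.2 0).foldl (fun acc2 mc =>
        let is_start_of_col := mc.1 == 0
        if is_start_of_col then
          (if kc.1 < delta + 1 then acc2 else acc2 ++ [(kc.1, mc.1, is_start_of_col)])
        else
          (if kc.1 < delta then acc2 else acc2 ++ [(kc.1, mc.1, is_start_of_col)])) acc) acc
    = acc ++ nodesOf delta L := by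
  intro L
  induction L with
  | nil => intro acc; simp [nodesOf]
  | cons kc t ih =>
    intro acc
    rw [List.foldl_cons, innerA_eq delta kc.1, ih]
    simp [nodesOf]

-- A's grouping step, expressed on the already-computed color
def gStep (st : List (List String) × List String × Option String) (c : String) :
    List (List String) × List String × Option String :=
  match st.2.2 with
  | none => (st.1, st.2.1 ++ [c], some c)
  | some lc => if c = lc then (st.1, st.2.1 ++ [c], some lc) else (st.1 ++ [st.2.1], [c], some c)

def gFinish (st : List (List String) × List String × Option String) : List (List String) :=
  if st.2.1 = [] then st.1 else st.1 ++ [st.2.1]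

-- grouping of consecutive equal elements (proof-side spec both programs are reduced to)
def pyGroupRuns : List String → List (List String)
  | [] => []
  | c :: rest =>
    match pyGroupRuns rest with
    | [] => [[c]]
    | g :: gs => if g.head? = some c then (c :: g) :: gs else [c] :: g :: gs

theorem runs_cons (c : String) (cs : List String) :
    ∃ t gs, pyGroupRuns (c :: cs) = (c :: t) :: gs := by
  rw [pyGroupRuns]
  cases h : pyGroupRuns cs with
  | nil => exact ⟨[], [], rfl⟩
  | cons g gs =>
    by_cases hh : g.head? = some c
    · simp only [hh, if_true]; exact ⟨g, gs, rfl⟩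
    · simp only [hh, if_false]; exact ⟨[], g :: gs, rfl⟩

theorem runs_replicate (n : Nat) (lc : String) :
    pyGroupRuns (List.replicate (n + 1) lc) = [List.replicate (n + 1) lc] := by
  induction n with
  | zero => rfl
  | succ m ih =>
    rw [List.replicate_succ, pyGroupRuns, ih]
    simp [List.replicate_succ]

theorem runs_rep_append (n : Nat) (lc c : String) (cs : List String) (hne : c ≠ lc) :
    pyGroupRuns (List.replicate (n + 1) lc ++ c :: cs)
      = List.replicate (n + 1) lc :: pyGroupRuns (c :: cs) := by
  induction n with
  | zero =>
    obtain ⟨t, gs, h⟩ := runs_cons c cs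
    rw [List.replicate_one, List.cons_append, List.nil_append, pyGroupRuns, h]
    simp [hne]
  | succ m ih =>
    rw [List.replicate_succ, List.cons_append, pyGroupRuns, ih]
    simp [List.replicate_succ]

theorem gRun :
    ∀ (colors : List String) (derived : List (List String)) (n : Nat) (lc : String),
    gFinish (colors.foldl gStep (derived, List.replicate (n + 1) lc, some lc))
      = derived ++ pyGroupRuns (List.replicate (n + 1) lc ++ colors) := by
  intro colors
  induction colors with
  | nil =>
    intro derived n lc
    rw [List.foldl_nil, List.append_nil, runs_replicate]
    simp [gFinish]
  | cons c cs ih =>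
    intro derived n lc
    rw [List.foldl_cons]
    show gFinish (cs.foldl gStep (gStep (derived, List.replicate (n + 1) lc, some lc) c)) = _
    by_cases hc : c = lc
    · subst hc
      have hst : gStep (derived, List.replicate (n + 1) c, some c) c
          = (derived, List.replicate (n + 2) c, some c) := by
        simp [gStep, ← List.replicate_succ']
      rw [hst, ih derived (n + 1) c,
        show List.replicate (n + 1) c ++ c :: cs = List.replicate (n + 2) c ++ cs by
          rw [show (c :: cs) = [c] ++ cs from rfl, ← List.append_assoc, ← List.replicate_succ']]
    · have hst : gStep (derived, List.replicate (n + 1) lc, some lc) c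
          = (derived ++ [List.replicate (n + 1) lc], List.replicate 1 c, some c) := by
        simp [gStep, hc]
      rw [hst, ih (derived ++ [List.replicate (n + 1) lc]) 0 c,
        runs_rep_append n lc c cs hc]
      simp

theorem gMain (colors : List String) :
    gFinish (colors.foldl gStep ([], [], none)) = pyGroupRuns colors := by
  cases colors with
  | nil => rfl
  | cons c cs =>
    rw [List.foldl_cons]
    show gFinish (cs.foldl gStep ([], List.replicate 1 c, some c)) = _
    rw [gRun cs [] 0 c]
    simp

-- ---------- B-side: run-length encoding invariant ----------

def expandRuns (runs : List (String × Int)) : List String :=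
  runs.flatMap (fun rc => List.replicate rc.2.toNat rc.1)

def Canon (runs : List (String × Int)) : Prop :=
  List.IsChain (fun a b : String × Int => a.1 ≠ b.1) runs ∧ ∀ rc ∈ runs, 0 < rc.2

theorem canon_addRun (runs : List (String × Int)) (c : String) (cnt : Int) (h : Canon runs) :
    Canon (addRun runs c cnt)
      ∧ expandRuns (addRun runs c cnt) = expandRuns runs ++ List.replicate cnt.toNat c := by
  obtain ⟨hch, hpos⟩ := h
  unfold addRun
  by_cases hc0 : cnt ≤ 0
  · simp only [hc0, if_true]
    exact ⟨⟨hch, hpos⟩, by simp [show cnt.toNat = 0 by omega, expandRuns]⟩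
  · simp only [hc0, if_false]
    cases hlast : runs.getLast? with
    | none =>
      have : runs = [] := List.getLast?_eq_none_iff.mp hlast
      subst this
      refine ⟨⟨List.IsChain.singleton _, ?_⟩, by simp [expandRuns]⟩
      intro rc hrc; simp at hrc; subst hrc; omega
    | some p =>
      obtain ⟨lc, lcnt⟩ := p
      have hdrop : runs.dropLast ++ [(lc, lcnt)] = runs := List.dropLast_append_getLast? _ hlast
      have hlmem : (lc, lcnt) ∈ runs := List.mem_of_getLast? hlast
      have hlpos : 0 < lcnt := hpos _ hlmem
      by_cases heq : lc = c
      · subst heq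
        simp only [if_true]
        constructor
        · constructor
          · have := hch
            rw [← hdrop] at this
            rw [List.isChain_append] at this ⊢
            refine ⟨this.1, by simp, ?_⟩
            intro x hx y hy
            simp at hy; subst hy
            exact this.2.2 x hx (lc, lcnt) (by simp)
          · intro rc hrc
            rcases List.mem_append.mp hrc with hin | hin
            · exact hpos _ (List.dropLast_subset runs hin)
            · simp at hin; subst hin; omega
        · conv_rhs => rw [← hdrop]
          simp only [expandRuns, List.flatMap_append, List.flatMap_cons, List.flatMap_nil]
          simp only [List.append_nil, List.append_assoc, ← List.replicate_add,
            show lcnt.toNat + cnt.toNat = (lcnt + cnt).toNat by omega]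
      · simp only [heq, if_false]
        constructor
        · constructor
          · rw [List.isChain_append]
            refine ⟨hch, by simp, ?_⟩
            intro x hx y hy
            simp at hy; subst hy
            rw [hlast] at hx; simp at hx; subst hx
            simpa using heq
          · intro rc hrc
            rcases List.mem_append.mp hrc with hin | hin
            · exact hpos _ hin
            · simp at hin; subst hin; omega
        · simp [expandRuns]

theorem group_expand (runs : List (String × Int)) (h : Canon runs) :
    pyGroupRuns (expandRuns runs) = runs.map (fun rc => List.replicate rc.2.toNat rc.1) := by
  induction runs with
  | nil => rfl
  | cons p rest ih =>
    obtain ⟨c, n⟩ := p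
    obtain ⟨hch, hpos⟩ := h
    have hn : 0 < n := hpos (c, n) (by simp)
    have hrest : Canon rest := ⟨hch.of_cons, fun rc hrc => hpos _ (List.mem_cons_of_mem _ hrc)⟩
    have hrepl : n.toNat = (n.toNat - 1) + 1 := by omega
    cases rest with
    | nil =>
      simp only [expandRuns, List.flatMap_cons, List.flatMap_nil, List.append_nil, List.map_cons,
        List.map_nil]
      rw [hrepl, runs_replicate]
    | cons q r2 =>
      obtain ⟨c2, n2⟩ := q
      have hne : c2 ≠ c := by
        have := List.isChain_cons_cons.mp hch
        exact fun he => this.1 he.symm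
      have hn2 : 0 < n2 := hpos (c2, n2) (by simp)
      have hexp : expandRuns ((c2, n2) :: r2)
          = c2 :: (List.replicate (n2.toNat - 1) c2 ++ expandRuns r2) := by
        simp only [expandRuns, List.flatMap_cons]
        rw [show n2.toNat = (n2.toNat - 1) + 1 by omega, List.replicate_succ]
        simp
      have : expandRuns ((c, n) :: (c2, n2) :: r2)
          = List.replicate ((n.toNat - 1) + 1) c
            ++ (c2 :: (List.replicate (n2.toNat - 1) c2 ++ expandRuns r2)) := by
        rw [show expandRuns ((c, n) :: (c2, n2) :: r2)
              = List.replicate n.toNat c ++ expandRuns ((c2, n2) :: r2) from by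
            simp [expandRuns], hexp, ← hrepl]
      rw [this, runs_rep_append _ _ _ _ hne, ← hexp, ih hrest, ← hrepl]
      simp

-- ---------- per-column colors ----------

-- colors contributed by one enumerated column, as A computes them
def colColors (br : List (List Int)) (delta : Int) (kc : Int × List Int) : List String :=
  (((PySem.List.enumerate kc.2 0).filter (elig delta kc.1)).map (nodeOf kc.1)).map (colorOf br delta)

theorem map_nonstart (br : List (List Int)) (delta k : Int) :
    ∀ (t : List Int) (s : Int), 1 ≤ s →
    ((PySem.List.enumerate t s).map (fun mc => colorOf br delta (nodeOf k mc)))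
      = List.replicate (min (t.length : Int)
            ((((PySem.List.pyGet? br (k - delta)).getD []).length : Int) - s)).toNat "red"
        ++ List.replicate (t.length - (min (t.length : Int)
            ((((PySem.List.pyGet? br (k - delta)).getD []).length : Int) - s)).toNat) "blue" := by
  intro t
  induction t with
  | nil => intro s _; simp [PySem.List.enumerate_nil]
  | cons a t ih =>
    intro s hs
    set T : Int := (((PySem.List.pyGet? br (k - delta)).getD []).length : Int) with hT
    rw [PySem.List.enumerate_cons, List.map_cons, ih (s + 1) (by omega)]
    have hcol : colorOf br delta (nodeOf k (s, a))
        = if s < T then "red" else "blue" := by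
      have hsz : ((s == 0) : Bool) = false := by
        simp only [beq_eq_false_iff_ne]; omega
      simp [colorOf, nodeOf, hsz, hT]
    rw [hcol]
    by_cases hlt : s < T
    · have h1 : (min ((a :: t).length : Int) (T - s)).toNat
          = (min (t.length : Int) (T - (s + 1))).toNat + 1 := by
        simp only [List.length_cons]; push_cast; omega
      have h2 : (a :: t).length - (min ((a :: t).length : Int) (T - s)).toNat
          = t.length - (min (t.length : Int) (T - (s + 1))).toNat := by
        simp only [List.length_cons]; push_cast; omega
      rw [if_pos hlt, h2, h1, List.replicate_succ]
      simp
    · have h1 : (min ((a :: t).length : Int) (T - s)).toNat = 0 := by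
        simp only [List.length_cons]; omega
      have h2 : (min (t.length : Int) (T - (s + 1))).toNat = 0 := by omega
      rw [if_neg hlt, h1, h2]
      simp [List.replicate_succ]

theorem filter_nonstart (delta k : Int) :
    ∀ (t : List Int) (s : Int), 1 ≤ s →
    (PySem.List.enumerate t s).filter (elig delta k)
      = if delta ≤ k then PySem.List.enumerate t s else [] := by
  intro t
  induction t with
  | nil => intro s _; simp [PySem.List.enumerate_nil]
  | cons a t ih =>
    intro s hs
    rw [PySem.List.enumerate_cons, List.filter_cons]
    have hsz : ((s == 0) : Bool) = false := by
      simp only [beq_eq_false_iff_ne]; omega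
    have he : elig delta k (s, a) = !decide (k < delta) := by simp [elig, hsz]
    rw [he, ih (s + 1) (by omega)]
    by_cases hd : delta ≤ k
    · rw [if_pos hd, if_pos hd]
      simp [show ¬ k < delta by omega]
    · rw [if_neg hd, if_neg hd]
      simp [show k < delta by omega]

-- closed form of colColors for one column
theorem colColors_closed (br : List (List Int)) (delta : Int) (k : Int) (col : List Int) :
    colColors br delta (k, col)
      = match col with
        | [] => []
        | _ :: t =>
          (if delta + 1 ≤ k then [colorOf br delta (k, 0, true)] else [])
          ++ (if delta ≤ k then
                List.replicate (min (t.length : Int)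
                    ((((PySem.List.pyGet? br (k - delta)).getD []).length : Int) - 1)).toNat "red"
                ++ List.replicate (t.length - (min (t.length : Int)
                    ((((PySem.List.pyGet? br (k - delta)).getD []).length : Int) - 1)).toNat) "blue"
              else []) := by
  cases col with
  | nil => simp [colColors, PySem.List.enumerate_nil]
  | cons c0 t =>
    simp only [colColors, PySem.List.enumerate_cons, List.filter_cons]
    have he0 : elig delta k ((0 : Int), c0) = !decide (k < delta + 1) := by
      simp [elig]
    simp only [zero_add]
    rw [he0, filter_nonstart delta k t 1 (le_refl 1)]
    by_cases h1 : delta + 1 ≤ k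
    · rw [if_pos h1]
      have : (!decide (k < delta + 1)) = true := by simp; omega
      rw [this, if_pos rfl]
      have hd : delta ≤ k := by omega
      rw [if_pos hd, if_pos hd, List.map_cons, List.map_cons]
      have hnode : nodeOf k ((0 : Int), c0) = (k, 0, true) := by simp [nodeOf]
      rw [hnode]
      simp only [List.map_map, Function.comp_def]
      rw [map_nonstart br delta k t 1 (le_refl 1)]
      simp
    · rw [if_neg h1]
      have : (!decide (k < delta + 1)) = false := by simp; omega
      rw [this]
      simp only [Bool.false_eq_true, if_false, List.nil_append]
      by_cases hd : delta ≤ k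
      · rw [if_pos hd, if_pos hd]
        simp only [List.map_map, Function.comp_def]
        rw [map_nonstart br delta k t 1 (le_refl 1)]
      · rw [if_neg hd, if_neg hd]
        simp

-- ---------- B's fold maintains the RLE invariant and expands to the flat colors ----------

theorem stepB (br : List (List Int)) (delta : Int) (runs : List (String × Int))
    (kc : Int × List Int) (h : Canon runs) :
    Canon ((fun runs kc =>
        let L : Int := (kc.2.length : Int)
        if L = 0 then runs
        else
          let runs1 :=
            if delta + 1 ≤ kc.1 then
              addRun runs
                (if ((PySem.List.pyGet? br (kc.1 - 1)).getD []).length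
                    = ((PySem.List.pyGet? br (kc.1 - 1 - delta)).getD []).length
                 then "red" else "blue") 1
            else runs
          if 2 ≤ L ∧ delta ≤ kc.1 then
            let reds : Int :=
              max 0 (min (L - 1) ((((PySem.List.pyGet? br (kc.1 - delta)).getD []).length : Int) - 1))
            addRun (addRun runs1 "red" reds) "blue" (L - 1 - reds)
          else runs1) runs kc)
    ∧ expandRuns ((fun runs kc =>
        let L : Int := (kc.2.length : Int)
        if L = 0 then runs
        else
          let runs1 :=
            if delta + 1 ≤ kc.1 then
              addRun runs
                (if ((PySem.List.pyGet? br (kc.1 - 1)).getD []).length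
                    = ((PySem.List.pyGet? br (kc.1 - 1 - delta)).getD []).length
                 then "red" else "blue") 1
            else runs
          if 2 ≤ L ∧ delta ≤ kc.1 then
            let reds : Int :=
              max 0 (min (L - 1) ((((PySem.List.pyGet? br (kc.1 - delta)).getD []).length : Int) - 1))
            addRun (addRun runs1 "red" reds) "blue" (L - 1 - reds)
          else runs1) runs kc)
      = expandRuns runs ++ colColors br delta kc := by
  obtain ⟨k, col⟩ := kc
  simp only
  rw [colColors_closed]
  cases col with
  | nil =>
    refine ⟨by simpa using h, ?_⟩
    simp
  | cons c0 t =>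
    have hL0 : ¬ (((c0 :: t).length : Int) = 0) := by simp only [List.length_cons]; push_cast; omega
    simp only [hL0, if_false]
    set sc : String :=
      (if ((PySem.List.pyGet? br (k - 1)).getD []).length
          = ((PySem.List.pyGet? br (k - 1 - delta)).getD []).length
       then "red" else "blue") with hsc
    have hscolor : colorOf br delta (k, 0, true) = sc := by
      simp [colorOf, hsc]
    set T : Int := (((PySem.List.pyGet? br (k - delta)).getD []).length : Int) with hT
    set runs1 : List (String × Int) :=
      (if delta + 1 ≤ k then addRun runs sc 1 else runs) with hruns1
    have h1 : Canon runs1 ∧ expandRuns runs1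
        = expandRuns runs ++ (if delta + 1 ≤ k then [colorOf br delta (k, 0, true)] else []) := by
      rw [hruns1]
      by_cases hk1 : delta + 1 ≤ k
      · rw [if_pos hk1, if_pos hk1]
        obtain ⟨hc, he⟩ := canon_addRun runs sc 1 h
        exact ⟨hc, by rw [he, hscolor]; rfl⟩
      · rw [if_neg hk1, if_neg hk1]; simp [h]
    by_cases h2 : 2 ≤ ((c0 :: t).length : Int) ∧ delta ≤ k
    · rw [if_pos h2]
      set reds : Int := max 0 (min (((c0 :: t).length : Int) - 1) (T - 1)) with hreds
      obtain ⟨hc1, he1⟩ := canon_addRun runs1 "red" reds h1.1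
      obtain ⟨hc2, he2⟩ := canon_addRun (addRun runs1 "red" reds) "blue"
        ((((c0 :: t).length : Int)) - 1 - reds) hc1
      refine ⟨hc2, ?_⟩
      rw [he2, he1, h1.2, if_pos h2.2]
      have hr : reds.toNat = (min (t.length : Int) (T - 1)).toNat := by
        rw [hreds]; simp only [List.length_cons]; push_cast; omega
      have hb : ((((c0 :: t).length : Int)) - 1 - reds).toNat
          = t.length - (min (t.length : Int) (T - 1)).toNat := by
        rw [hreds]; simp only [List.length_cons]; push_cast; omega
      rw [hr, hb]
      simp [List.append_assoc]
    · rw [if_neg h2]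
      refine ⟨h1.1, ?_⟩
      rw [h1.2]
      have : (if delta ≤ k then
          List.replicate (min (t.length : Int) (T - 1)).toNat "red"
          ++ List.replicate (t.length - (min (t.length : Int) (T - 1)).toNat) "blue" else [])
          = ([] : List String) := by
        by_cases hd : delta ≤ k
        · have ht : t.length = 0 := by
            by_contra hh
            exact h2 ⟨by simp only [List.length_cons]; push_cast; omega, hd⟩
          rw [if_pos hd,
            show (min (t.length : Int) (T - 1)).toNat = 0 from by omega, ht]
          simp
        · simp [hd]
      rw [this, List.append_nil]

theorem foldB (br : List (List Int)) (delta : Int) :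
    ∀ (L : List (Int × List Int)) (runs : List (String × Int)), Canon runs →
    Canon (L.foldl (fun runs kc =>
        let L : Int := (kc.2.length : Int)
        if L = 0 then runs
        else
          let runs1 :=
            if delta + 1 ≤ kc.1 then
              addRun runs
                (if ((PySem.List.pyGet? br (kc.1 - 1)).getD []).length
                    = ((PySem.List.pyGet? br (kc.1 - 1 - delta)).getD []).length
                 then "red" else "blue") 1
            else runs
          if 2 ≤ L ∧ delta ≤ kc.1 then
            let reds : Int :=
              max 0 (min (L - 1) ((((PySem.List.pyGet? br (kc.1 - delta)).getD []).length : Int) - 1))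
            addRun (addRun runs1 "red" reds) "blue" (L - 1 - reds)
          else runs1) runs)
    ∧ expandRuns (L.foldl (fun runs kc =>
        let L : Int := (kc.2.length : Int)
        if L = 0 then runs
        else
          let runs1 :=
            if delta + 1 ≤ kc.1 then
              addRun runs
                (if ((PySem.List.pyGet? br (kc.1 - 1)).getD []).length
                    = ((PySem.List.pyGet? br (kc.1 - 1 - delta)).getD []).length
                 then "red" else "blue") 1
            else runs
          if 2 ≤ L ∧ delta ≤ kc.1 then
            let reds : Int :=
              max 0 (min (L - 1) ((((PySem.List.pyGet? br (kc.1 - delta)).getD []).length : Int) - 1))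
            addRun (addRun runs1 "red" reds) "blue" (L - 1 - reds)
          else runs1) runs)
      = expandRuns runs ++ L.flatMap (colColors br delta) := by
  intro L
  induction L with
  | nil => intro runs h; exact ⟨h, by simp⟩
  | cons kc tl ih =>
    intro runs h
    rw [List.foldl_cons]
    obtain ⟨hc, he⟩ := stepB br delta runs kc h
    obtain ⟨hc', he'⟩ := ih _ hc
    refine ⟨hc', ?_⟩
    rw [he', he]
    simp

-- ===== VERDICT (by name: the statement is the Claim_ definition above) =====
theorem build_derived_road_py_spec : Claim_equal_build_derived_road_py := by
  intro br delta _hdom _hpre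
  unfold Spec_build_derived_road_py build_derived_road_py build_derived_road_py_alt
  by_cases hg : br = [] ∨ (br.length : Int) ≤ delta
  · simp [hg]
  · simp only [hg, if_false]
    rw [outerA_eq delta (PySem.List.enumerate br 0) [], List.nil_append]
    have hstep : (fun (st : List (List String) × List String × Option String)
        (node : Int × Int × Bool) =>
        let color : String :=
          if node.2.2 then
            let col_1 := (PySem.List.pyGet? br (node.1 - 1)).getD []
            let col_2 := (PySem.List.pyGet? br (node.1 - 1 - delta)).getD []
            if col_1.length = col_2.length then "red" else "blue"
          else
            let target_col := (PySem.List.pyGet? br (node.1 - delta)).getD []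
            if node.2.1 < (target_col.length : Int) then "red" else "blue"
        match st.2.2 with
        | none => (st.1, st.2.1 ++ [color], some color)
        | some lc =>
          if color = lc then (st.1, st.2.1 ++ [color], some lc)
          else (st.1 ++ [st.2.1], [color], some color))
        = fun st node => gStep st (colorOf br delta node) := by
      funext st node
      rfl
    rw [hstep, ← List.foldl_map]
    show gFinish _ = _
    rw [gMain]
    obtain ⟨hc, he⟩ := foldB br delta (PySem.List.enumerate br 0) [] ⟨by simp, by simp⟩
    rw [← group_expand _ hc, he]
    show pyGroupRuns ((nodesOf delta (PySem.List.enumerate br 0)).map (colorOf br delta)) = _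
    congr 1
    simp only [expandRuns, List.flatMap_nil, List.nil_append, nodesOf, List.map_flatMap]
    rfl
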